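-- pv_equiv track=rewrite | github.com/Amaan9136/concept-drift-xai | utils/adaptive_learning.py | should_retrain
-- ===== SOURCE A (Python) =====
-- from typing import Dict, List
--
-- def should_retrain(drift_results: Dict[str, Dict], performance_drift: bool) -> bool:
--     """Determine if model retraining is necessary"""
--     high_drift_features = [
--         feature for feature, results in drift_results.items()
--         if results['drift_severity'] == 'HIGH'
--     ]
--
--     medium_drift_features = [
--         feature for feature, results in drift_results.items()
--         if results['drift_severity'] == 'MEDIUM'
--     ]
--
--     # Decision criteria
--     if performance_drift:
--         return True
--     if len(high_drift_features) >= 2: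
--         return True
--     if len(medium_drift_features) >= 4:
--         return True
--
--     return False
-- ===== SOURCE B (Python) =====
-- def _budget(vals, high_left, med_left):
--     """Recursively consume threshold budgets; True as soon as one is exhausted."""
--     if high_left == 0 or med_left == 0:
--         return True
--     if not vals:
--         return False
--     sev = vals[0]['drift_severity']
--     return _budget(vals[1:],
--                    high_left - (sev == 'HIGH'),
--                    med_left - (sev == 'MEDIUM'))
--
-- def should_retrain(drift_results, performance_drift):
--     """Determine if model retraining is necessary"""
--     if performance_drift:
--         return True
--     return _budget(list(drift_results.values()), 2, 4)
-- ===== Notes on version B (the rewrite author's own statement) =====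
-- stated objective: alternative
-- what changed: Replaces A's two list-building filter passes plus threshold comparisons with a recursive budget-decrement scan that starts with budgets 2 (HIGH) and 4 (MEDIUM), decrements them per entry, and short-circuits True the moment a budget is exhausted.
import Mathlib
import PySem

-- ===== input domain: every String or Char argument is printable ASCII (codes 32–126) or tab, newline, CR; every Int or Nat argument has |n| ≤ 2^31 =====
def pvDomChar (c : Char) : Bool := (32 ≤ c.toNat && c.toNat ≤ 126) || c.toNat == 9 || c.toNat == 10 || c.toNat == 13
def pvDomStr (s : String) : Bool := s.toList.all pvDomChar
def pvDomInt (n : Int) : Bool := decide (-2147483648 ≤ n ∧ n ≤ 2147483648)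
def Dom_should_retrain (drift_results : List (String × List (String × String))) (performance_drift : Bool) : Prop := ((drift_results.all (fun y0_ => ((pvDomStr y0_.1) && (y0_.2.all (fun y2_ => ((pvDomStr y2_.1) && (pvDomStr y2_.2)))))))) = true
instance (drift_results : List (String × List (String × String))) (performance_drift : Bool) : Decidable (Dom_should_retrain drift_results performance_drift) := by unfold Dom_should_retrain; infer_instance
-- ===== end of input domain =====

-- B replaces A's two list-building filter passes with a recursive budget-decrement
-- scan (budgets 2/4, short-circuits True when one is exhausted); objective: alternative.


-- ===== PORT A =====
-- results['drift_severity'] is ported as Dict.getD _ "drift_severity" "": exact under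
-- Pre_should_retrain (key present everywhere); outside Pre_ Python raises KeyError.
def should_retrain (drift_results : List (String × List (String × String))) (performance_drift : Bool) : Bool :=
  let high_drift_features :=
    (drift_results.filter
      (fun p => PySem.Dict.getD (PySem.Dict.mk p.2) "drift_severity" "" == "HIGH")).map (·.1)
  let medium_drift_features :=
    (drift_results.filter
      (fun p => PySem.Dict.getD (PySem.Dict.mk p.2) "drift_severity" "" == "MEDIUM")).map (·.1)
  if performance_drift then true
  else if 2 ≤ high_drift_features.length then true
  else if 4 ≤ medium_drift_features.length then true
  else false

-- ===== PORT B =====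
-- _budget: recursive budget-decrement scan; sev == 'HIGH' coerces to 1/0 as in Python
def budget_should_retrain (vals : List (List (String × String))) (high_left med_left : Int) : Bool :=
  if high_left = 0 || med_left = 0 then true
  else match vals with
    | [] => false
    | v :: rest =>
        budget_should_retrain rest
          (high_left - (if PySem.Dict.getD (PySem.Dict.mk v) "drift_severity" "" == "HIGH" then 1 else 0))
          (med_left - (if PySem.Dict.getD (PySem.Dict.mk v) "drift_severity" "" == "MEDIUM" then 1 else 0))

def should_retrain_alt (drift_results : List (String × List (String × String))) (performance_drift : Bool) : Bool :=
  if performance_drift then true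
  else budget_should_retrain (drift_results.map (·.2)) 2 4

-- ===== PRECONDITION & SPEC =====
-- Pre_ excludes exactly the inputs where Python's A raises KeyError (some feature's
-- result dict lacks the 'drift_severity' key); A returns no value there.
def Pre_should_retrain (drift_results : List (String × List (String × String))) (performance_drift : Bool) : Prop :=
  (drift_results.all (fun p => PySem.Dict.contains (PySem.Dict.mk p.2) "drift_severity")) = true
instance (drift_results : List (String × List (String × String))) (performance_drift : Bool) : Decidable (Pre_should_retrain drift_results performance_drift) := by unfold Pre_should_retrain; infer_instance

def pvWitness_should_retrain : (List (String × List (String × String))) × Bool :=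
  ([("f1", [("drift_severity", "HIGH")]), ("f2", [("drift_severity", "MEDIUM")])], false)

def Spec_should_retrain (drift_results : List (String × List (String × String))) (performance_drift : Bool) (out : Bool) : Prop := out = should_retrain_alt drift_results performance_drift
instance (drift_results : List (String × List (String × String))) (performance_drift : Bool) (out : Bool) : Decidable (Spec_should_retrain drift_results performance_drift out) := by unfold Spec_should_retrain; infer_instance

-- ===== CLAIM (what is proved, stated in full; the proofs are below) =====
def Claim_equal_should_retrain : Prop := ∀ (drift_results : List (String × List (String × String))) (performance_drift : Bool), Dom_should_retrain drift_results performance_drift → Pre_should_retrain drift_results performance_drift → Spec_should_retrain drift_results performance_drift (should_retrain drift_results performance_drift)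

-- ===== LEMMAS AND PROOFS =====

-- the budget scan returns true iff one of the remaining budgets is met by the counts
theorem budget_eq (vals : List (List (String × String))) (hl ml : Int)
    (hhl : 0 ≤ hl) (hml : 0 ≤ ml) :
    budget_should_retrain vals hl ml
      = (decide (hl ≤ (vals.countP (fun v => PySem.Dict.getD (PySem.Dict.mk v) "drift_severity" "" == "HIGH") : Int))
         || decide (ml ≤ (vals.countP (fun v => PySem.Dict.getD (PySem.Dict.mk v) "drift_severity" "" == "MEDIUM") : Int))) := by
  induction vals generalizing hl ml with
  | nil =>
    unfold budget_should_retrain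
    by_cases h : hl = 0 ∨ ml = 0
    · rcases h with h | h <;> simp [h]
    · push_neg at h
      simp only [List.countP_nil]
      have : ¬ (hl = 0 || ml = 0) = true := by simp [h.1, h.2]
      simp only [if_neg this]
      have h1 : ¬ hl ≤ 0 := by omega
      have h2 : ¬ ml ≤ 0 := by omega
      simp [h1, h2]
  | cons v rest ih =>
    unfold budget_should_retrain
    by_cases h : hl = 0 ∨ ml = 0
    · have hle : hl ≤ ((v :: rest).countP (fun v => PySem.Dict.getD (PySem.Dict.mk v) "drift_severity" "" == "HIGH") : Int)
               ∨ ml ≤ ((v :: rest).countP (fun v => PySem.Dict.getD (PySem.Dict.mk v) "drift_severity" "" == "MEDIUM") : Int) := by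
        rcases h with h | h
        · left; rw [h]; positivity
        · right; rw [h]; positivity
      have hc : (hl = 0 || ml = 0) = true := by
        rcases h with h | h <;> simp [h]
      rw [if_pos hc]
      rcases hle with hle | hle <;> simp [hle]
    · push_neg at h
      have hc : ¬ (hl = 0 || ml = 0) = true := by simp [h.1, h.2]
      rw [if_neg hc]
      dsimp only
      rw [ih _ _ (by split <;> omega) (by split <;> omega)]
      simp only [List.countP_cons]
      by_cases hH : (PySem.Dict.getD (PySem.Dict.mk v) "drift_severity" "" == "HIGH") = true <;>
        by_cases hM : (PySem.Dict.getD (PySem.Dict.mk v) "drift_severity" "" == "MEDIUM") = true <;>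
          simp only [hH, hM, if_true, if_false, Bool.false_eq_true] <;>
            congr 1 <;> rw [decide_eq_decide] <;> push_cast <;> omega

-- ===== VERDICT (by name: the statement is the Claim_ definition above) =====
theorem should_retrain_spec : Claim_equal_should_retrain := by
  intro dr pd _ _
  unfold Spec_should_retrain should_retrain should_retrain_alt
  cases pd with
  | true => simp
  | false =>
    rw [budget_eq _ 2 4 (by norm_num) (by norm_num)]
    simp only [List.length_map, ← List.countP_eq_length_filter, List.countP_map, Function.comp_def]
    by_cases h2 : 2 ≤ dr.countP (fun p => PySem.Dict.getD (PySem.Dict.mk p.2) "drift_severity" "" == "HIGH") <;>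
      by_cases h4 : 4 ≤ dr.countP (fun p => PySem.Dict.getD (PySem.Dict.mk p.2) "drift_severity" "" == "MEDIUM") <;>
        simp [h2, h4] <;> omega
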